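-- pv_equiv track=rewrite | github.com/dongguk-macaron/macaron_5_AA1_5 | src/missions/mission_tunnel.py | find_largest_second_largest
-- ===== SOURCE A (Python) =====
-- def find_largest_second_largest(list_data):
--     max_val = float('-inf')
--     second_max_val = float('-inf')
--     max_index = -1
--     second_max_index = -1
--
--     for i, val in enumerate(list_data):
--         if val > max_val:
--             second_max_val = max_val
--             second_max_index = max_index
--             max_val = val
--             max_index = i
--         elif val > second_max_val:
--             second_max_val = val
--             second_max_index = i
--     return [max_index, second_max_index]
-- ===== SOURCE B (Python) =====
-- def find_largest_second_largest(list_data):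
--     # Pass 1: first index of the maximum (strict > keeps first occurrence).
--     max_val = float('-inf')
--     max_index = -1
--     for i, val in enumerate(list_data):
--         if val > max_val:
--             max_val = val
--             max_index = i
--     # Pass 2: maximum over all other positions.
--     second_val = float('-inf')
--     second_index = -1
--     for i, val in enumerate(list_data):
--         if i != max_index and val > second_val:
--             second_val = val
--             second_index = i
--     return [max_index, second_index]
-- ===== Notes on version B (the rewrite author's own statement) =====
-- stated objective: simpler
-- what changed: Replaces the single loop carrying a coupled 4-field max/second-max state (with demotion of the old max) by two independent single-state passes: first find the first index of the maximum, then find the maximum over the remaining indices.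
import Mathlib
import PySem

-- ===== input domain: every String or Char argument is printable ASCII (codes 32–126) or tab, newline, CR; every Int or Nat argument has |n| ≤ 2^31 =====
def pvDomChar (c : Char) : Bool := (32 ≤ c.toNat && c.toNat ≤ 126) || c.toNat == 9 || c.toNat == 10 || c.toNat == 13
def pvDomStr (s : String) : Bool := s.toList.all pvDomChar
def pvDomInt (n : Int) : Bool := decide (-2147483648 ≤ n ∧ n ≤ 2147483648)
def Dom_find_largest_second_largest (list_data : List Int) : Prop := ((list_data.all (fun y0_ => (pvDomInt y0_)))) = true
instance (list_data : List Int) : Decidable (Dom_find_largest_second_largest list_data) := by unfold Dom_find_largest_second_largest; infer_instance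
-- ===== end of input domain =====

-- ===== PORT A =====
-- B changes: two independent single-state passes instead of one loop with a coupled
-- max/second-max state (objective: simpler decomposition; same O(n) cost).
-- float('-inf') is modelled by Option Int's none (inputs are Ints, so this is exact:
-- 'val > -inf' is always true and no int equals -inf).
def pvGtOpt (v : Int) (m : Option Int) : Bool :=
  match m with
  | none => true
  | some x => decide (x < v)

-- the single loop of A: state (max_val, second_max_val, max_index, second_max_index)
def pvALoop : List Int → Int → (Option Int × Option Int × Int × Int) → (Option Int × Option Int × Int × Int)
  | [], _, st => st
  | v :: rest, i, (mv, sv, mi, si) =>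
    if pvGtOpt v mv then pvALoop rest (i+1) (some v, mv, i, mi)
    else if pvGtOpt v sv then pvALoop rest (i+1) (mv, some v, mi, i)
    else pvALoop rest (i+1) (mv, sv, mi, si)

def find_largest_second_largest (list_data : List Int) : List Int :=
  match pvALoop list_data 0 (none, none, -1, -1) with
  | (_, _, mi, si) => [mi, si]

-- ===== PORT B =====
-- pass 1 of Source B: first index of the maximum
def pvPass1 : List Int → Int → (Option Int × Int) → (Option Int × Int)
  | [], _, st => st
  | v :: rest, i, (mv, mi) =>
    pvPass1 rest (i+1) (if pvGtOpt v mv then (some v, i) else (mv, mi))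

-- pass 2 of Source B: maximum over indices ≠ skip
def pvPass2 (skip : Int) : List Int → Int → (Option Int × Int) → (Option Int × Int)
  | [], _, st => st
  | v :: rest, i, (sv, si) =>
    pvPass2 skip rest (i+1) (if i ≠ skip ∧ pvGtOpt v sv = true then (some v, i) else (sv, si))

def find_largest_second_largest_alt (list_data : List Int) : List Int :=
  match pvPass1 list_data 0 (none, -1) with
  | (_, mi) =>
    match pvPass2 mi list_data 0 (none, -1) with
    | (_, si) => [mi, si]

-- ===== PRECONDITION & SPEC =====
def Spec_find_largest_second_largest (list_data : List Int) (out : List Int) : Prop := out = find_largest_second_largest_alt list_data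
instance (list_data : List Int) (out : List Int) : Decidable (Spec_find_largest_second_largest list_data out) := by unfold Spec_find_largest_second_largest; infer_instance

-- ===== CLAIM (what is proved, stated in full; the proofs are below) =====
def Claim_equal_find_largest_second_largest : Prop := ∀ (list_data : List Int), Dom_find_largest_second_largest list_data → Spec_find_largest_second_largest list_data (find_largest_second_largest list_data)

-- ===== LEMMAS AND PROOFS =====

-- the resulting index of pass 1 is either the initial one or inside the scanned range
lemma pvPass1_idx : ∀ (l : List Int) (i : Int) (mv : Option Int) (mi : Int),
    (pvPass1 l i (mv, mi)).2 = mi ∨ i ≤ (pvPass1 l i (mv, mi)).2 := by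
  intro l
  induction l with
  | nil => intro i mv mi; left; rfl
  | cons v rest ih =>
    intro i mv mi
    simp only [pvPass1]
    by_cases h : pvGtOpt v mv = true
    · simp only [h, if_true]
      rcases ih (i+1) (some v) i with h1 | h1
      · right; omega
      · right; omega
    · simp only [h, if_false, Bool.false_eq_true]
      rcases ih (i+1) mv mi with h1 | h1
      · left; exact h1
      · right; omega
    
-- main invariant: A's loop equals pass1 together with pass2 with the right skip/start
lemma pvALoop_eq : ∀ (l : List Int) (i : Int) (mv sv : Option Int) (mi si : Int),
    mi < i →
    pvALoop l i (mv, sv, mi, si) =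
      ((pvPass1 l i (mv, mi)).1,
       (if (pvPass1 l i (mv, mi)).2 = mi
        then pvPass2 (pvPass1 l i (mv, mi)).2 l i (sv, si)
        else pvPass2 (pvPass1 l i (mv, mi)).2 l i (mv, mi)).1,
       (pvPass1 l i (mv, mi)).2,
       (if (pvPass1 l i (mv, mi)).2 = mi
        then pvPass2 (pvPass1 l i (mv, mi)).2 l i (sv, si)
        else pvPass2 (pvPass1 l i (mv, mi)).2 l i (mv, mi)).2) := by
  intro l
  induction l with
  | nil => intro i mv sv mi si hmi; simp [pvALoop, pvPass1, pvPass2]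
  | cons v rest ih =>
    intro i mv sv mi si hmi
    by_cases hg : pvGtOpt v mv = true
    · -- A takes the new-max branch
      have hstep : pvALoop (v :: rest) i (mv, sv, mi, si)
          = pvALoop rest (i+1) (some v, mv, i, mi) := by
        simp [pvALoop, hg]
      have hp1 : pvPass1 (v :: rest) i (mv, mi) = pvPass1 rest (i+1) (some v, i) := by
        simp [pvPass1, hg]
      rw [hstep, ih (i+1) (some v) mv i mi (by omega), hp1]
      rcases pvPass1_idx rest (i+1) (some v) i with h1 | h1
      · -- final max index is i itself
        have h2' : pvPass2 (pvPass1 rest (i+1) (some v, i)).2 (v :: rest) i (mv, mi)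
            = pvPass2 (pvPass1 rest (i+1) (some v, i)).2 rest (i+1) (mv, mi) := by
          simp [pvPass2, h1]
        rw [h1] at h2'
        simp only [h1, if_true, if_neg (show ¬ (i : Int) = mi by omega), h2']
      · -- final max index lies strictly beyond i
        have hne : ¬ (pvPass1 rest (i+1) (some v, i)).2 = mi := by omega
        have hne' : ¬ (pvPass1 rest (i+1) (some v, i)).2 = i := by omega
        have h2' : pvPass2 (pvPass1 rest (i+1) (some v, i)).2 (v :: rest) i (mv, mi)
            = pvPass2 (pvPass1 rest (i+1) (some v, i)).2 rest (i+1) (some v, i) := by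
          have : (i ≠ (pvPass1 rest (i+1) (some v, i)).2 ∧ pvGtOpt v mv = true) := ⟨fun h => hne' h.symm, hg⟩
          simp [pvPass2, this]
        simp only [if_neg hne', if_neg hne, h2']
    · -- val ≤ max_val
      have hp1 : pvPass1 (v :: rest) i (mv, mi) = pvPass1 rest (i+1) (mv, mi) := by
        simp [pvPass1, hg]
      have hne0 : ¬ (i : Int) = mi := by omega
      by_cases hs : pvGtOpt v sv = true
      · -- A takes the new-second branch
        have hstep : pvALoop (v :: rest) i (mv, sv, mi, si)
            = pvALoop rest (i+1) (mv, some v, mi, i) := by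
          simp [pvALoop, hg, hs]
        rw [hstep, ih (i+1) mv (some v) mi i (by omega), hp1]
        rcases pvPass1_idx rest (i+1) mv mi with h1 | h1
        · -- max index unchanged
          have h2 : pvPass2 (pvPass1 rest (i+1) (mv, mi)).2 (v :: rest) i (sv, si)
              = pvPass2 (pvPass1 rest (i+1) (mv, mi)).2 rest (i+1) (some v, i) := by
            have : (i ≠ (pvPass1 rest (i+1) (mv, mi)).2 ∧ pvGtOpt v sv = true) := by
              constructor
              · omega
              · exact hs
            simp [pvPass2, this]
          rw [h1] at h2
          simp only [h1, if_true, h2]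
        · -- max index lies beyond i
          have hne : ¬ (pvPass1 rest (i+1) (mv, mi)).2 = mi := by omega
          have h2 : pvPass2 (pvPass1 rest (i+1) (mv, mi)).2 (v :: rest) i (mv, mi)
              = pvPass2 (pvPass1 rest (i+1) (mv, mi)).2 rest (i+1) (mv, mi) := by
            have hcond : ¬ (i ≠ (pvPass1 rest (i+1) (mv, mi)).2 ∧ pvGtOpt v mv = true) := by
              intro h; exact hg h.2
            simp [pvPass2, hcond]
          simp only [if_neg hne, h2]
      · -- A leaves the state unchanged
        have hstep : pvALoop (v :: rest) i (mv, sv, mi, si)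
            = pvALoop rest (i+1) (mv, sv, mi, si) := by
          simp [pvALoop, hg, hs]
        rw [hstep, ih (i+1) mv sv mi si (by omega), hp1]
        rcases pvPass1_idx rest (i+1) mv mi with h1 | h1
        · have h2 : pvPass2 (pvPass1 rest (i+1) (mv, mi)).2 (v :: rest) i (sv, si)
              = pvPass2 (pvPass1 rest (i+1) (mv, mi)).2 rest (i+1) (sv, si) := by
            have hcond : ¬ (i ≠ (pvPass1 rest (i+1) (mv, mi)).2 ∧ pvGtOpt v sv = true) := by
              intro h; exact hs h.2
            simp [pvPass2, hcond]
          rw [h1] at h2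
          simp only [h1, if_true, h2]
        · have hne : ¬ (pvPass1 rest (i+1) (mv, mi)).2 = mi := by omega
          have h2 : pvPass2 (pvPass1 rest (i+1) (mv, mi)).2 (v :: rest) i (mv, mi)
              = pvPass2 (pvPass1 rest (i+1) (mv, mi)).2 rest (i+1) (mv, mi) := by
            have hcond : ¬ (i ≠ (pvPass1 rest (i+1) (mv, mi)).2 ∧ pvGtOpt v mv = true) := by
              intro h; exact hg h.2
            simp [pvPass2, hcond]
          simp only [if_neg hne, h2]

theorem find_largest_second_largest_spec : Claim_equal_find_largest_second_largest := by
  intro l _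
  unfold Spec_find_largest_second_largest find_largest_second_largest find_largest_second_largest_alt
  have h := pvALoop_eq l 0 none none (-1) (-1) (by omega)
  rw [h]
  by_cases hc : (pvPass1 l 0 ((none : Option Int), -1)).2 = -1 <;> simp [hc]
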